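-- pv_equiv track=rewrite | github.com/stravoris-tech/collatz-hidden-order | scripts/route_skeleton.py | route_skeleton_from_code
-- ===== SOURCE A (Python) =====
-- from typing import List, Dict, Set, Callable, Optional
--
-- def parse_blocks(code: str) -> List[str]:
--     """
--     Split ω(n) into maximal blocks of:
--       - K^r
--       - (A/C)^r
--     """
--     blocks: List[str] = []
--     i = 0
--     while i < len(code):
--         ch = code[i]
--         if ch == "K":
--             j = i
--             while j < len(code) and code[j] == "K":
--                 j += 1
--             blocks.append(code[i:j])
--             i = j
--         else:
--             j = i
--             while j < len(code) and code[j] in ("A", "C"):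
--                 j += 1
--             blocks.append(code[i:j])
--             i = j
--     return blocks
--
-- def route_skeleton_from_code(code: str, structural_chain: List[int]) -> List[int]:
--     """
--     Junction nodes (phase boundaries): endpoints of maximal blocks in ω(n).
--     """
--     if len(structural_chain) != len(code) + 1:
--         raise ValueError("Expected len(structural_chain) == len(ω(n)) + 1")
--     blocks = parse_blocks(code)
--     endpoints = [structural_chain[0]]  # start (1)
--     idx = 0
--     for b in blocks:
--         idx += len(b)
--         endpoints.append(structural_chain[idx])
--     return endpoints
-- ===== SOURCE B (Python) =====
-- def route_skeleton_from_code(code, structural_chain):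
--     """
--     Junction nodes (phase boundaries): endpoints of maximal blocks in omega(n),
--     found in one fused pass by detecting category changes between adjacent
--     characters (K vs A/C), without building any block list.
--     """
--     if len(structural_chain) != len(code) + 1:
--         raise ValueError("Expected len(structural_chain) == len(ω(n)) + 1")
--     endpoints = [structural_chain[0]]
--     for prev, cur, pt in zip(code, code[1:], structural_chain[1:]):
--         if (prev == "K") != (cur == "K"):
--             endpoints.append(pt)
--     if code:
--         endpoints.append(structural_chain[len(code)])
--     return endpoints
-- ===== Notes on version B (the rewrite author's own statement) =====
-- stated objective: simpler
-- what changed: B drops parse_blocks entirely: instead of grouping the code into maximal K / A-C blocks and cumulating block lengths, it makes one fused pass over adjacent character pairs and appends a chain value at every category change (plus the final position).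
import Mathlib
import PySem

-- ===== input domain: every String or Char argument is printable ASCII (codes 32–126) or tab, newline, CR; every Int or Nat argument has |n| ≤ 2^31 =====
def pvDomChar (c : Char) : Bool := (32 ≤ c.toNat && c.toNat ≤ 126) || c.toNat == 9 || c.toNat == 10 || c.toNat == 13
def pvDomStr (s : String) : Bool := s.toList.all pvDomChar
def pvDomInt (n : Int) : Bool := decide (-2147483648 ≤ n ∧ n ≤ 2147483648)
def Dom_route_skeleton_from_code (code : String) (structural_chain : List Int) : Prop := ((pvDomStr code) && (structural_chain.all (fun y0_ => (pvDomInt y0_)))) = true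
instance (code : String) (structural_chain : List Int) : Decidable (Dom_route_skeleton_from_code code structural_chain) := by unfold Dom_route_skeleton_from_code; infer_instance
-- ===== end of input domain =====

-- B replaces the parse_blocks/cumulative-length pass by a single fused pass that
-- detects category changes between adjacent characters (objective: simpler).

-- ===== PORT A =====
-- inner 'while j < len(code) and code[j] == "K"' scan
def pvRunK : List Char → List Char × List Char
  | [] => ([], [])
  | c :: cs =>
    if c == 'K' then
      let p := pvRunK cs
      (c :: p.1, p.2)
    else ([], c :: cs)

-- inner 'while j < len(code) and code[j] in ("A", "C")' scan
def pvRunAC : List Char → List Char × List Char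
  | [] => ([], [])
  | c :: cs =>
    if c == 'A' || c == 'C' then
      let p := pvRunAC cs
      (c :: p.1, p.2)
    else ([], c :: cs)

-- outer while of parse_blocks; fuel only makes the loop total (Python diverges on an
-- invalid character, where the scan makes no progress; such inputs are outside Pre_)
def pvParseBlocks : Nat → List Char → List (List Char)
  | 0, _ => []
  | _, [] => []
  | Nat.succ f, c :: cs =>
    let p := if c == 'K' then pvRunK (c :: cs) else pvRunAC (c :: cs)
    p.1 :: pvParseBlocks f p.2

def route_skeleton_from_code (code : String) (structural_chain : List Int) : List Int :=
  let cs := code.toList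
  if structural_chain.length ≠ cs.length + 1 then []  -- ValueError (outside Pre_)
  else
    let blocks := pvParseBlocks cs.length cs
    (blocks.foldl
      (fun (st : Int × List Int) b =>
        let idx := st.1 + (b.length : Int)
        (idx, st.2 ++ [(PySem.List.pyGet? structural_chain idx).getD 0]))
      (0, [(PySem.List.pyGet? structural_chain 0).getD 0])).2

-- ===== PORT B =====
def route_skeleton_from_code_alt (code : String) (structural_chain : List Int) : List Int :=
  let cs := code.toList
  if structural_chain.length ≠ cs.length + 1 then []  -- ValueError (outside Pre_)
  else
    let endpoints := [(PySem.List.pyGet? structural_chain 0).getD 0]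
    let endpoints := ((cs.zip cs.tail).zip structural_chain.tail).foldl
      (fun acc t =>
        if ((t.1.1 == 'K') != (t.1.2 == 'K')) then acc ++ [t.2] else acc)
      endpoints
    if cs.isEmpty then endpoints
    else endpoints ++ [(PySem.List.pyGet? structural_chain (cs.length : Int)).getD 0]

-- ===== PRECONDITION & SPEC =====
-- Pre_ excludes inputs where A raises ValueError (length mismatch) and inputs with a
-- character other than K/A/C, on which A's parse_blocks loops forever (no value).
def Pre_route_skeleton_from_code (code : String) (structural_chain : List Int) : Prop :=
  structural_chain.length = code.toList.length + 1 ∧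
  (code.toList.all (fun c => c == 'K' || c == 'A' || c == 'C')) = true
instance (code : String) (structural_chain : List Int) : Decidable (Pre_route_skeleton_from_code code structural_chain) := by unfold Pre_route_skeleton_from_code; infer_instance

def pvWitness_route_skeleton_from_code : String × List Int := ("KA", [1, 2, 3])

def Spec_route_skeleton_from_code (code : String) (structural_chain : List Int) (out : List Int) : Prop := out = route_skeleton_from_code_alt code structural_chain
instance (code : String) (structural_chain : List Int) (out : List Int) : Decidable (Spec_route_skeleton_from_code code structural_chain out) := by unfold Spec_route_skeleton_from_code; infer_instance

-- ===== CLAIM (what is proved, stated in full; the proofs are below) =====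
def Claim_equal_route_skeleton_from_code : Prop := ∀ (code : String) (structural_chain : List Int), Dom_route_skeleton_from_code code structural_chain → Pre_route_skeleton_from_code code structural_chain → Spec_route_skeleton_from_code code structural_chain (route_skeleton_from_code code structural_chain)

-- ===== LEMMAS AND PROOFS =====

-- category of a character: K-block vs A/C-block
def pvCat (c : Char) : Bool := c == 'K'

-- common recursive description of the endpoint values (one per block boundary):
-- pvE c cs xs walks position pairs; xs holds the chain values at positions 1..n
def pvE : Char → List Char → List Int → List Int
  | _, [], xs => xs
  | c, c' :: cs, x :: xs => if pvCat c != pvCat c' then x :: pvE c' cs xs else pvE c' cs xs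
  | _, _ :: _, [] => []

-- run helpers compute takeWhile/dropWhile of their predicate
theorem pvRunK_eq : ∀ cs : List Char,
    pvRunK cs = (cs.takeWhile (fun d => d == 'K'), cs.dropWhile (fun d => d == 'K')) := by
  intro cs
  induction cs with
  | nil => rfl
  | cons c cs ih =>
    simp only [pvRunK, List.takeWhile, List.dropWhile]
    cases h : (c == 'K') <;> simp [h, ih]

theorem pvRunAC_eq : ∀ cs : List Char,
    pvRunAC cs = (cs.takeWhile (fun d => d == 'A' || d == 'C'),
                  cs.dropWhile (fun d => d == 'A' || d == 'C')) := by
  intro cs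
  induction cs with
  | nil => rfl
  | cons c cs ih =>
    simp only [pvRunAC, List.takeWhile, List.dropWhile]
    cases h : (c == 'A' || c == 'C') <;> simp [h, ih]

theorem pvTW_congr {α : Type} (p q : α → Bool) :
    ∀ l : List α, (∀ x ∈ l, p x = q x) →
      l.takeWhile p = l.takeWhile q ∧ l.dropWhile p = l.dropWhile q := by
  intro l
  induction l with
  | nil => intro _; exact ⟨rfl, rfl⟩
  | cons a l ih =>
    intro h
    have ha : p a = q a := h a (by simp)
    have ih' := ih (fun x hx => h x (by simp [hx]))
    simp only [List.takeWhile, List.dropWhile, ha]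
    cases q a <;> simp [ih'.1, ih'.2]

-- the selected inner scan = span of "same category as c", given only valid chars
theorem pvRun_sel (c : Char) (cs : List Char)
    (hv : ∀ d ∈ c :: cs, d = 'K' ∨ d = 'A' ∨ d = 'C') :
    (if c == 'K' then pvRunK (c :: cs) else pvRunAC (c :: cs)) =
      (c :: cs.takeWhile (fun d => pvCat d == pvCat c),
       cs.dropWhile (fun d => pvCat d == pvCat c)) := by
  by_cases hc : c = 'K'
  · subst hc
    have hpq : ∀ d ∈ cs, (d == 'K') = (pvCat d == pvCat 'K') := by
      intro d _; simp [pvCat]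
    have h := pvTW_congr _ _ cs hpq
    simp [pvRunK, pvRunK_eq, h.1, h.2]
  · have hcK : (c == 'K') = false := by simp [hc]
    have hcat : pvCat c = false := by simp [pvCat, hc]
    have hcAC : (c == 'A' || c == 'C') = true := by
      rcases hv c (by simp) with h | h | h
      · exact absurd h hc
      · simp [h]
      · simp [h]
    have hpq : ∀ d ∈ cs, (d == 'A' || d == 'C') = (pvCat d == pvCat c) := by
      intro d hd
      rcases hv d (by simp [hd]) with h | h | h <;> simp [h, pvCat, hcat, hc]
    have h := pvTW_congr _ _ cs hpq
    simp [hcK, pvRunAC, pvRunAC_eq, hcAC, h.1, h.2]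

theorem pvParseBlocks_nil : ∀ f : Nat, pvParseBlocks f [] = [] := by
  intro f; cases f <;> rfl

theorem pvE_cat_congr (c c' : Char) (h : pvCat c = pvCat c') :
    ∀ (cs : List Char) (xs : List Int), pvE c cs xs = pvE c' cs xs := by
  intro cs xs
  cases cs with
  | nil => rfl
  | cons a cs => cases xs with
    | nil => rfl
    | cons x xs => simp [pvE, h]

-- pvE skips a same-category run
theorem pvE_absorb : ∀ (b : List Char) (c : Char) (cs : List Char) (xs1 xs2 : List Int),
    (∀ d ∈ b, pvCat d = pvCat c) → xs1.length = b.length →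
    pvE c (b ++ cs) (xs1 ++ xs2) = pvE c cs xs2 := by
  intro b
  induction b with
  | nil =>
    intro c cs xs1 xs2 _ hlen
    have : xs1 = [] := List.eq_nil_of_length_eq_zero hlen
    simp [this]
  | cons d b ih =>
    intro c cs xs1 xs2 hcat hlen
    cases xs1 with
    | nil => simp at hlen
    | cons x xs1 =>
      have hd : pvCat d = pvCat c := hcat d (by simp)
      have h1 : pvE d (b ++ cs) (xs1 ++ xs2) = pvE d cs xs2 := by
        refine ih d cs xs1 xs2 ?_ (by simpa using hlen)
        intro e he; rw [hcat e (by simp [he]), hd]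
      have h2 := pvE_cat_congr d c hd cs xs2
      simpa [pvE, hd, h1] using h2

theorem pvDropWhile_head_false {p : Char → Bool} {l r : List Char} {c : Char}
    (h : l.dropWhile p = c :: r) : p c = false := by
  have hne : l.dropWhile p ≠ [] := by simp [h]
  have h2 := List.head_dropWhile_not p hne
  simp only [h, List.head_cons] at h2
  exact h2

-- A's endpoint loop over the parsed blocks produces pvE (strong induction on the fuel)
theorem pvLA : ∀ (fuel : Nat) (c : Char) (cs : List Char) (pre xs acc chain : List Int),
    chain = pre ++ xs →
    (∀ d ∈ c :: cs, d = 'K' ∨ d = 'A' ∨ d = 'C') →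
    xs.length = cs.length + 1 →
    cs.length + 1 ≤ fuel →
    ((pvParseBlocks fuel (c :: cs)).foldl
        (fun (st : Int × List Int) b =>
          let idx := st.1 + (b.length : Int)
          (idx, st.2 ++ [(PySem.List.pyGet? chain idx).getD 0]))
        (((pre.length : Int) - 1), acc)).2 = acc ++ pvE c cs xs := by
  intro fuel
  induction fuel with
  | zero => intro c cs pre xs acc chain _ _ _ hf; omega
  | succ f ih =>
    intro c cs pre xs acc chain hchain hv hlen hf
    set tw := cs.takeWhile (fun d => pvCat d == pvCat c) with htw
    set dw := cs.dropWhile (fun d => pvCat d == pvCat c) with hdw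
    have hsplit : tw ++ dw = cs := List.takeWhile_append_dropWhile
    have htwle : tw.length ≤ cs.length := by
      have := congrArg List.length hsplit; simp at this; omega
    have hb : tw.length < xs.length := by omega
    have htwcat : ∀ d ∈ tw, pvCat d = pvCat c := by
      intro d hd
      rw [htw] at hd
      exact eq_of_beq (List.mem_takeWhile_imp (p := fun d => pvCat d == pvCat c) hd)
    have hstep : pvParseBlocks (Nat.succ f) (c :: cs) =
        (c :: tw) :: pvParseBlocks f dw := by
      simp only [pvParseBlocks]
      rw [pvRun_sel c cs hv]
    rw [hstep, List.foldl_cons]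
    have hidx : (pre.length : Int) - 1 + ((c :: tw).length : Int) =
        (pre.length : Int) + (tw.length : Int) := by
      simp only [List.length_cons]; push_cast; omega
    have hget : (PySem.List.pyGet? chain ((pre.length : Int) + (tw.length : Int))).getD 0 =
        xs[tw.length]'hb := by
      rw [hchain, PySem.List.pyGet?_append_right, List.getElem?_eq_getElem hb]
      rfl
    have habs : pvE c cs xs = pvE c dw (xs.drop tw.length) := by
      have e1 : pvE c cs xs =
          pvE c (tw ++ dw) (xs.take tw.length ++ xs.drop tw.length) := by
        rw [hsplit, List.take_append_drop]
      rw [e1, pvE_absorb tw c dw (xs.take tw.length) (xs.drop tw.length) htwcat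
        (by rw [List.length_take]; omega)]
    have hdropcons : xs.drop tw.length = xs[tw.length]'hb :: xs.drop (tw.length + 1) :=
      List.drop_eq_getElem_cons hb
    cases hdwc : dw with
    | nil =>
      rw [pvParseBlocks_nil, List.foldl_nil]
      simp only [hidx, hget]
      have hcs : cs.length = tw.length := by
        have := congrArg List.length hsplit; rw [hdwc] at this; simp at this; omega
      have hdrop1 : xs.drop (tw.length + 1) = [] := by
        apply List.drop_eq_nil_of_le; omega
      rw [habs, hdwc, hdropcons, hdrop1]
      rfl
    | cons d0 dw' =>
      have hd0 : pvCat d0 ≠ pvCat c := by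
        have := pvDropWhile_head_false (hdw.symm.trans hdwc)
        simpa using this
      have hdwsub : ∀ d ∈ dw, d ∈ cs := fun d hd => (cs.dropWhile_sublist _).subset hd
      have hlen2 : cs.length = tw.length + dw'.length + 1 := by
        have := congrArg List.length hsplit; rw [hdwc] at this; simp at this; omega
      have hpre' : (((pre ++ xs.take (tw.length + 1)).length : Int)) - 1 =
          (pre.length : Int) + (tw.length : Int) := by
        rw [List.length_append, List.length_take]; push_cast; omega
      have hih := ih d0 dw' (pre ++ xs.take (tw.length + 1)) (xs.drop (tw.length + 1))
        (acc ++ [xs[tw.length]'hb]) chain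
        (by rw [List.append_assoc, List.take_append_drop]; exact hchain)
        (by intro d hd
            rw [List.mem_cons] at hd
            rcases hd with rfl | hd
            · exact hv d (by right; exact hdwsub d (by rw [hdwc]; simp))
            · exact hv d (by right; exact hdwsub d (by rw [hdwc]; simp [hd])))
        (by rw [List.length_drop]; omega)
        (by omega)
      rw [hpre'] at hih
      simp only [hidx, hget, hih]
      rw [habs, hdwc, hdropcons]
      simp only [pvE]
      rw [if_pos (by simp [bne_iff_ne]; exact fun h => hd0 h.symm)]
      simp

-- B's fused boundary pass produces pvE
theorem pvLB : ∀ (cs : List Char) (c : Char) (xs : List Int) (y : Int) (acc : List Int),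
    xs.length = cs.length →
    ((((c :: cs).zip cs).zip (xs ++ [y])).foldl
        (fun acc t => if ((t.1.1 == 'K') != (t.1.2 == 'K')) then acc ++ [t.2] else acc)
        acc) ++ [y] = acc ++ pvE c cs (xs ++ [y]) := by
  intro cs
  induction cs with
  | nil =>
    intro c xs y acc hlen
    have : xs = [] := List.eq_nil_of_length_eq_zero hlen
    subst this
    simp [pvE]
  | cons c' cs2 ih =>
    intro c xs y acc hlen
    cases xs with
    | nil => simp at hlen
    | cons x xs2 =>
      have hlen2 : xs2.length = cs2.length := by simpa using hlen
      simp only [List.zip_cons_cons, List.cons_append, List.foldl_cons]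
      have hcond : ((c == 'K') != (c' == 'K')) = (pvCat c != pvCat c') := rfl
      cases hc : (pvCat c != pvCat c') with
      | false =>
        rw [hcond, hc, if_neg (by simp), ih c' xs2 y acc hlen2]
        simp [pvE, hc]
      | true =>
        rw [hcond, hc, if_pos rfl, ih c' xs2 y (acc ++ [x]) hlen2]
        simp [pvE, hc]

theorem route_skeleton_from_code_spec : Claim_equal_route_skeleton_from_code := by
  intro code chain _ hpre
  obtain ⟨hlen, hvb⟩ := hpre
  have hv : ∀ c ∈ code.toList, c = 'K' ∨ c = 'A' ∨ c = 'C' := by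
    intro c hc
    have := List.all_eq_true.mp hvb c hc
    simp at this
    tauto
  clear hvb
  unfold Spec_route_skeleton_from_code route_skeleton_from_code route_skeleton_from_code_alt
  generalize hg : code.toList = cs at hlen hv ⊢
  rw [if_neg (by omega), if_neg (by omega)]
  cases cs with
  | nil => simp [pvParseBlocks]
  | cons c cs' =>
    cases chain with
    | nil => simp at hlen
    | cons x0 xs =>
      have hxs : xs.length = cs'.length + 1 := by simpa using hlen
      obtain ⟨ys, y, rfl⟩ : ∃ ys y, xs = ys ++ [y] := by
        rcases List.eq_nil_or_concat xs with h | ⟨ys, y, h⟩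
        · rw [h] at hxs; simp at hxs
        · exact ⟨ys, y, by simpa [List.concat_eq_append] using h⟩
      have hys : ys.length = cs'.length := by
        have := hxs; rw [List.length_append] at this; simp at this; omega
      have h0 : (PySem.List.pyGet? (x0 :: (ys ++ [y])) 0).getD 0 = x0 := by
        rw [PySem.List.pyGet?_zero_cons]; rfl
      have hA := pvLA (cs'.length + 1) c cs' [x0] (ys ++ [y])
        [x0] (x0 :: (ys ++ [y]))
        rfl hv (by simp [hys]) (le_refl _)
      norm_num at hA
      have hB := pvLB cs' c ys y [x0] hys
      simp only [List.length_cons, List.tail_cons, List.isEmpty_cons, h0,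
        Bool.false_eq_true, if_false]
      rw [hA, ← List.singleton_append, ← hB]
      have hget : (PySem.List.pyGet? (x0 :: (ys ++ [y])) ((cs'.length + 1 : Nat) : Int)).getD 0
          = y := by
        rw [PySem.List.pyGet?_natCast]
        rw [show cs'.length + 1 = ys.length + 1 by omega]
        simp [List.getElem?_concat_length]
      rw [hget]
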